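-- pv_equiv track=rewrite | github.com/Plymouth-University/comp2003-2025-2026-team-1 | scripts/dav/delete_blank.py | delete_blank_grid_objects
-- ===== SOURCE A (Python) =====
-- def delete_blank_grid_objects(grid_objects: dict):
--     """
--     Removes entries from the grid_objects dictionary where the value is an empty list.
--     Also collects the keys of the deleted entries to update the grid accordingly.
--     Parameters:
--         grid_objects (dict): A dictionary representing grid objects, where keys are object identifiers and values are lists of properties.
--     Returns:
--         tuple: A tuple containing the modified grid_objects dictionary and a list of deleted keys.
--     """
--
--     deleted_keys = []
--     keys = list(grid_objects.keys())
--     for key in keys: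
--         if grid_objects[key] == []:
--             deleted_keys.append(key)
--             del grid_objects[key]
--
--     return grid_objects, deleted_keys
-- ===== SOURCE B (Python) =====
-- def delete_blank_grid_objects(grid_objects: dict):
--     """Rebuild-and-replace: partition by constructing the kept dict with a comprehension,
--     derive deleted_keys as the complement via membership in kept, then swap the contents
--     of grid_objects in place (clear + update) instead of deleting entries."""
--     kept = {k: v for k, v in grid_objects.items() if v != []}
--     deleted_keys = [k for k in grid_objects if k not in kept]
--     grid_objects.clear()
--     grid_objects.update(kept)
--     return grid_objects, deleted_keys
-- ===== Notes on version B (the rewrite author's own statement) =====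
-- stated objective: alternative
-- what changed: A deletes blank entries one by one while scanning a snapshot of the keys; B never deletes: it rebuilds the kept dict with a comprehension, derives deleted_keys as the complement by membership lookup in kept, and replaces grid_objects' contents wholesale with clear()+update().
import Mathlib
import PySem

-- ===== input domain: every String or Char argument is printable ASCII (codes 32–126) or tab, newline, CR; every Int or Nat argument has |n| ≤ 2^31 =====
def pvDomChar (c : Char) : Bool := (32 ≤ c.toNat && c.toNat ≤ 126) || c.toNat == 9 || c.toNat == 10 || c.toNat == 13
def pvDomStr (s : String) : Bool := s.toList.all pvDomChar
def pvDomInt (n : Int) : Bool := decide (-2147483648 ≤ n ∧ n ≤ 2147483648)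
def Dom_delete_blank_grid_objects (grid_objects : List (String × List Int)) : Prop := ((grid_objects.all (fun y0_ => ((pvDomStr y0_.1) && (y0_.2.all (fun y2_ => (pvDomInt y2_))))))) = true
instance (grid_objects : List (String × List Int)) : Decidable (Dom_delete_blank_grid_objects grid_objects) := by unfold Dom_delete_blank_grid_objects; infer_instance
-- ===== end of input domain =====

-- B rebuilds the kept dict and swaps it into grid_objects (clear+update) instead of deleting in place;
-- both Pythons leave grid_objects holding the same entries in the same order, and the equivalence is about the returned pair.

-- ===== PORT A =====
-- one interleaved pass over a snapshot of the keys: check, record, delete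
def pvStepA (st : PySem.Dict String (List Int) × List String) (key : String) :
    PySem.Dict String (List Int) × List String :=
  match st.1.get? key with          -- grid_objects[key]  (key is always present under Pre_)
  | some v => if v == [] then (st.1.erase key, st.2 ++ [key]) else st
  | none => st

def delete_blank_grid_objects (grid_objects : List (String × List Int)) : (List (String × List Int)) × List String :=
  let d : PySem.Dict String (List Int) := PySem.Dict.mk grid_objects
  let keys := d.keys
  let r := keys.foldl pvStepA (d, ([] : List String))
  (r.1.items, r.2)

-- ===== PORT B =====
-- kept = {k: v for k, v in grid_objects.items() if v != []}  (dict comprehension = insert loop over fresh keys)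
-- deleted_keys = [k for k in grid_objects if k not in kept]
-- grid_objects.clear(); grid_objects.update(kept)  → the returned dict's items are kept.items
def delete_blank_grid_objects_alt (grid_objects : List (String × List Int)) : (List (String × List Int)) × List String :=
  let d : PySem.Dict String (List Int) := PySem.Dict.mk grid_objects
  let kept := (d.items.filter (fun p => !(p.2 == []))).foldl
      (fun (d : PySem.Dict String (List Int)) p => d.insert p.1 p.2) PySem.Dict.empty
  let deleted_keys := d.keys.filter (fun k => !(kept.contains k))
  (kept.items, deleted_keys)

-- ===== PRECONDITION & SPEC =====
-- Pre_: the association list has pairwise-distinct keys — the invariant of every Python dict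
-- (a duplicate-keyed list cannot arise from A's dict argument, so nothing is claimed there).
def Pre_delete_blank_grid_objects (grid_objects : List (String × List Int)) : Prop :=
  (grid_objects.map Prod.fst).Nodup
instance (grid_objects : List (String × List Int)) : Decidable (Pre_delete_blank_grid_objects grid_objects) := by unfold Pre_delete_blank_grid_objects; infer_instance

def pvWitness_delete_blank_grid_objects : (List (String × List Int)) := [("a", []), ("b", [1, 2])]

def Spec_delete_blank_grid_objects (grid_objects : List (String × List Int)) (out : (List (String × List Int)) × List String) : Prop := out = delete_blank_grid_objects_alt grid_objects
instance (grid_objects : List (String × List Int)) (out : (List (String × List Int)) × List String) : Decidable (Spec_delete_blank_grid_objects grid_objects out) := by unfold Spec_delete_blank_grid_objects; infer_instance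

-- ===== CLAIM (what is proved, stated in full; the proofs are below) =====
def Claim_equal_delete_blank_grid_objects : Prop := ∀ (grid_objects : List (String × List Int)), Dom_delete_blank_grid_objects grid_objects → Pre_delete_blank_grid_objects grid_objects → Spec_delete_blank_grid_objects grid_objects (delete_blank_grid_objects grid_objects)

-- ===== LEMMAS AND PROOFS =====

-- A's loop, generalized: a processed prefix `pre` of non-blank pairs stays, the remaining
-- pairs `l` split into kept and deleted by the emptiness test.
lemma pvAloop (l : List (String × List Int)) (pre : List (String × List Int)) (acc : List String)
    (hnd : ((pre ++ l).map Prod.fst).Nodup) (hpre : ∀ p ∈ pre, ¬ p.2 = []) :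
    (l.map Prod.fst).foldl pvStepA (PySem.Dict.mk (pre ++ l), acc)
      = (PySem.Dict.mk (pre ++ l.filter (fun p => !(p.2 == []))),
         acc ++ (l.filter (fun p => p.2 == [])).map Prod.fst) := by
  induction l generalizing pre acc with
  | nil => simp
  | cons p t ih =>
    have hfind : (PySem.Dict.mk (pre ++ p :: t)).get? p.1 = some p.2 := by
      simp only [PySem.Dict.get?, List.find?_append]
      have : pre.find? (fun q => q.1 == p.1) = none := by
        rw [List.find?_eq_none]
        intro q hq
        simp only [List.map_append, List.map_cons, List.nodup_append] at hnd
        have := hnd.2.2 q.1 (List.mem_map_of_mem hq)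
        simp_all
      simp [this]
    by_cases hb : p.2 = []
    · have herase : (PySem.Dict.mk (pre ++ p :: t)).erase p.1 = PySem.Dict.mk (pre ++ t) := by
        simp only [PySem.Dict.erase, List.filter_append, List.filter_cons, beq_self_eq_true,
          Bool.not_true, Bool.false_eq_true, if_false]
        simp only [List.map_append, List.map_cons, List.nodup_append, List.nodup_cons] at hnd
        have h1 : pre.filter (fun q => !(q.1 == p.1)) = pre := by
          rw [List.filter_eq_self]
          intro q hq
          have := hnd.2.2 q.1 (List.mem_map_of_mem hq)
          simp_all
        have h2 : t.filter (fun q => !(q.1 == p.1)) = t := by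
          rw [List.filter_eq_self]
          intro q hq
          have hnin : p.1 ∉ t.map Prod.fst := hnd.2.1.1
          have hq1 : q.1 ∈ t.map Prod.fst := List.mem_map_of_mem hq
          simp only [Bool.not_eq_true', beq_eq_false_iff_ne]
          exact fun h => hnin (h ▸ hq1)
        rw [h1, h2]
      simp only [List.map_cons, List.foldl_cons, pvStepA, hfind, hb, beq_self_eq_true, if_true,
        herase]
      have hnd' : ((pre ++ t).map Prod.fst).Nodup := by
        simp only [List.map_append, List.map_cons, List.nodup_append, List.nodup_cons] at hnd ⊢
        exact ⟨hnd.1, hnd.2.1.2, fun a ha b hbm => hnd.2.2 a ha b (List.mem_cons_of_mem _ hbm)⟩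
      rw [ih pre (acc ++ [p.1]) hnd' hpre]
      simp [hb]
    · simp only [List.map_cons, List.foldl_cons, pvStepA, hfind]
      have hbeq : (p.2 == ([] : List Int)) = false := by simp [hb]
      simp only [hbeq, Bool.false_eq_true, if_false]
      have hnd' : (((pre ++ [p]) ++ t).map Prod.fst).Nodup := by
        simpa [List.append_assoc] using hnd
      have hpre' : ∀ q ∈ pre ++ [p], ¬ q.2 = [] := by
        intro q hq
        rcases List.mem_append.mp hq with h | h
        · exact hpre q h
        · simp only [List.mem_singleton] at h; exact h ▸ hb
      have hih := ih (pre ++ [p]) acc hnd' hpre'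
      rw [show pre ++ p :: t = (pre ++ [p]) ++ t by simp] at *
      rw [hih]
      simp [hb]

-- B's comprehension: inserting a nodup-keyed pair list into the empty dict yields exactly that list.
lemma pvBkept (l : List (String × List Int)) (hnd : (l.map Prod.fst).Nodup) :
    (l.foldl (fun (d : PySem.Dict String (List Int)) p => d.insert p.1 p.2)
        PySem.Dict.empty).items = l := by
  have h := PySem.Dict.items_foldl_insert_fresh (l := l) (k := Prod.fst) (v := Prod.snd)
      (d := PySem.Dict.empty) (by intro a _; exact PySem.Dict.contains_empty _) hnd
  simpa using h

-- ===== VERDICT (by name: the statement is the Claim_ definition above) =====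
theorem delete_blank_grid_objects_spec : Claim_equal_delete_blank_grid_objects := by
  intro l _ hpre
  unfold Spec_delete_blank_grid_objects delete_blank_grid_objects delete_blank_grid_objects_alt
  simp only [PySem.Dict.keys]
  have hA := pvAloop l [] [] (by simpa using hpre) (by simp)
  simp only [List.nil_append] at hA
  rw [hA]
  have hndk : ((l.filter (fun p => !(p.2 == []))).map Prod.fst).Nodup :=
    (List.Sublist.map Prod.fst (List.filter_sublist (l := l))).nodup hpre
  have hkept := pvBkept (l.filter (fun p => !(p.2 == []))) hndk
  refine Prod.ext (by simp only [hkept]) ?_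
  -- deleted lists: A's filter-by-blankness vs B's complement-of-kept membership
  have hcont : ∀ p ∈ l,
      (((l.filter (fun p => !(p.2 == []))).foldl
          (fun (d : PySem.Dict String (List Int)) p => d.insert p.1 p.2)
          PySem.Dict.empty).contains p.1) = !(p.2 == []) := by
    intro p hp
    rw [PySem.Dict.contains_eq_decide_mem_keys]
    have hkeys : ((l.filter (fun p => !(p.2 == []))).foldl
        (fun (d : PySem.Dict String (List Int)) p => d.insert p.1 p.2)
        PySem.Dict.empty).keys = (l.filter (fun p => !(p.2 == []))).map Prod.fst := by
      show (_ : PySem.Dict String (List Int)).items.map Prod.fst = _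
      rw [pvBkept _ hndk]
    rw [hkeys]
    by_cases hb : p.2 = []
    · have hnm : p.1 ∉ (l.filter (fun p => !(p.2 == []))).map Prod.fst := by
        intro hc
        rcases List.mem_map.mp hc with ⟨q, hq, hq1⟩
        have hqb : ¬ q.2 = [] := by simpa using (List.mem_filter.mp hq).2
        have hpq : p = q := List.inj_on_of_nodup_map hpre hp (List.mem_filter.mp hq).1 hq1.symm
        exact hqb (hpq ▸ hb)
      rw [decide_eq_false hnm]; simp [hb]
    · have hm : p.1 ∈ (l.filter (fun p => !(p.2 == []))).map Prod.fst :=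
        List.mem_map_of_mem (List.mem_filter.mpr ⟨hp, by simp [hb]⟩)
      rw [decide_eq_true hm]; simp [hb]
  -- rewrite B's deleted_keys: filter over map = map over filter, then pointwise agreement
  rw [List.filter_map]
  symm
  have : l.filter ((fun k => !(((l.filter (fun p => !(p.2 == []))).foldl
          (fun (d : PySem.Dict String (List Int)) p => d.insert p.1 p.2)
          PySem.Dict.empty).contains k)) ∘ Prod.fst)
      = l.filter (fun p => p.2 == []) := by
    apply List.filter_congr
    intro p hp
    simp only [Function.comp_apply, hcont p hp, Bool.not_not]
  rw [this]
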